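-- pv_equiv track=rewrite | github.com/VAKovalenko/vak_module_2_hard | module_2_hard.py | get_cipher
-- ===== SOURCE A (Python) =====
-- def get_cipher(number):
--     '''
--     Эта функция принимает число и генерирует шифр из пар чисел друг за другом, таких,
--     что входное число было кратно(делилось без остатка) сумме их значений.
--     :param number: number
--     :return: cipher
--     '''
--     cipher = ''
--     for i in range(1, number):
--         for j in range(2, number):
--             if j <= i:
--                 continue
--             if number % (i + j) == 0:
--                 cipher += str(i) + str(j)
--     return cipher
-- ===== SOURCE B (Python) =====
-- def get_cipher(number):
--     # Divisor-driven rewrite: enumerate the divisors of `number` once, then for each i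
--     # walk the ascending divisor list s and take j = s - i, instead of scanning all j.
--     if number < 2:
--         return ''
--     divs = [s for s in range(1, number + 1) if number % s == 0]
--     parts = []
--     for i in range(1, number):
--         for s in divs:
--             j = s - i
--             if i < j <= number - 1:
--                 parts.append(str(i) + str(j))
--     return ''.join(parts)
-- ===== Notes on version B (the rewrite author's own statement) =====
-- stated objective: faster
-- what changed: Instead of testing every pair (i, j) with a quadratic double scan, B enumerates the divisors of number once and, for each i, reads the partners j = s - i off the ascending divisor list, collecting the pieces and joining them at the end.
import Mathlib
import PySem

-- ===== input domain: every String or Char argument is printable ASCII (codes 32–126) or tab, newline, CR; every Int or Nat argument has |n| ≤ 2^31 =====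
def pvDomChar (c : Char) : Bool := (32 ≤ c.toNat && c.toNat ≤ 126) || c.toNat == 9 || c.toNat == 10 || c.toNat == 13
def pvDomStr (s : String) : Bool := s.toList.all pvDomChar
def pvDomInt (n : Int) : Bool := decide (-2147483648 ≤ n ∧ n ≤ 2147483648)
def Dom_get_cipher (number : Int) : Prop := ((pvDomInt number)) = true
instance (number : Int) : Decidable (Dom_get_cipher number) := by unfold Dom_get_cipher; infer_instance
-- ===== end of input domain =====

-- B replaces A's double scan over all pairs by enumerating the divisors of `number` once and,
-- for each i, reading the partners j = s - i off the ascending divisor list (objective: faster).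

-- ===== PORT A =====
def get_cipher (number : Int) : String :=
  (PySem.List.pyRange 1 number 1).foldl (fun cipher i =>
    (PySem.List.pyRange 2 number 1).foldl (fun cipher j =>
      if j ≤ i then cipher
      else if PySem.Int.mod number (i + j) = 0 then
        cipher ++ PySem.Int.toStr i ++ PySem.Int.toStr j
      else cipher) cipher) ""

-- ===== PORT B =====
def get_cipher_alt (number : Int) : String :=
  if number < 2 then "" else
    let divs := (PySem.List.pyRange 1 (number + 1) 1).filter (fun s => PySem.Int.mod number s == 0)
    let parts := (PySem.List.pyRange 1 number 1).foldl (fun parts i =>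
      divs.foldl (fun parts s =>
        let j := s - i
        if i < j ∧ j ≤ number - 1 then parts ++ [PySem.Int.toStr i ++ PySem.Int.toStr j]
        else parts) parts) []
    PySem.Str.join "" parts

-- ===== PRECONDITION & SPEC =====
def Spec_get_cipher (number : Int) (out : String) : Prop := out = get_cipher_alt number
instance (number : Int) (out : String) : Decidable (Spec_get_cipher number out) := by unfold Spec_get_cipher; infer_instance

-- ===== CLAIM (what is proved, stated in full; the proofs are below) =====
def Claim_equal_get_cipher : Prop := ∀ (number : Int), Dom_get_cipher number → Spec_get_cipher number (get_cipher number)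

-- ===== LEMMAS AND PROOFS =====

theorem flatten_intersperse_nil (xs : List (List Char)) :
    (List.intersperse ([] : List Char) xs).flatten = xs.flatten := by
  induction xs with
  | nil => rfl
  | cons x t ih =>
    cases t with
    | nil => rfl
    | cons y t' => simpa [List.intersperse] using ih

theorem join_empty_cons (x : String) (xs : List String) :
    PySem.Str.join "" (x :: xs) = x ++ PySem.Str.join "" xs := by
  simp [PySem.Str.join, PySem.Chars.join, List.intercalate, flatten_intersperse_nil,
    String.ofList_append]

theorem join_empty_append (xs ys : List String) :
    PySem.Str.join "" (xs ++ ys) = PySem.Str.join "" xs ++ PySem.Str.join "" ys := by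
  induction xs with
  | nil => simp [PySem.Str.join, PySem.Chars.join, List.intercalate]
  | cons x t ih => simp [join_empty_cons, ih, String.append_assoc]

theorem join_map_join (l : List Int) (g : Int → List String) :
    PySem.Str.join "" (l.map (fun i => PySem.Str.join "" (g i))) =
      PySem.Str.join "" (l.flatMap g) := by
  induction l with
  | nil => rfl
  | cons x t ih => simp [join_empty_cons, List.flatMap_cons, join_empty_append, ih]

-- A's inner loop, characterised as the join of a filtered map
theorem innerA_eq (number i : Int) (l : List Int) (acc : String) :
    l.foldl (fun c j =>
      if j ≤ i then c
      else if PySem.Int.mod number (i + j) = 0 then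
        c ++ PySem.Int.toStr i ++ PySem.Int.toStr j
      else c) acc
    = acc ++ PySem.Str.join ""
        ((l.filter (fun j => decide (i < j ∧ PySem.Int.mod number (i + j) = 0))).map
          (fun j => PySem.Int.toStr i ++ PySem.Int.toStr j)) := by
  induction l generalizing acc with
  | nil => simp [PySem.Str.join, PySem.Chars.join, List.intercalate]
  | cons x t ih =>
    by_cases hle : x ≤ i
    · simp [List.foldl_cons, hle, Int.not_lt.mpr hle, ih]
    · by_cases hm : PySem.Int.mod number (i + x) = 0
      · simp only [List.foldl_cons, if_neg hle, if_pos hm]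
        rw [ih, List.filter_cons_of_pos (by simp [Int.not_le.mp hle, hm]), List.map_cons,
          join_empty_cons]
        simp [String.append_assoc]
      · simp [List.foldl_cons, hle, hm, ih]

-- a string fold of appends is the join of the map (A's outer loop shape)
theorem outer_str_fold (l : List Int) (g : Int → String) (acc : String) :
    l.foldl (fun c i => c ++ g i) acc = acc ++ PySem.Str.join "" (l.map g) := by
  induction l generalizing acc with
  | nil => simp [PySem.Str.join, PySem.Chars.join, List.intercalate]
  | cons x t ih => simp [List.foldl_cons, ih, join_empty_cons, String.append_assoc]

-- B's filtered divisor list, shifted by i, is exactly A's filtered j-range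
theorem divs_filter_eq (number i : Int) (h2 : 2 ≤ number) (hi : 1 ≤ i) :
    ((PySem.List.pyRange 1 (number + 1) 1).filter
        (fun s => PySem.Int.mod number s == 0)).filter
      (fun s => decide (i < s - i ∧ s - i ≤ number - 1))
    = ((PySem.List.pyRange 2 number 1).filter
        (fun j => decide (i < j ∧ PySem.Int.mod number (i + j) = 0))).map (fun j => j + i) := by
  have hpL : (((PySem.List.pyRange 1 (number + 1) 1).filter
      (fun s => PySem.Int.mod number s == 0)).filter
      (fun s => decide (i < s - i ∧ s - i ≤ number - 1))).Pairwise (· < ·) :=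
    List.Pairwise.filter _ (List.Pairwise.filter _ (PySem.List.pairwise_lt_pyRange_one 1 (number + 1)))
  have hpR : (((PySem.List.pyRange 2 number 1).filter
      (fun j => decide (i < j ∧ PySem.Int.mod number (i + j) = 0))).map (fun j => j + i)).Pairwise (· < ·) :=
    List.Pairwise.map (S := fun a b => a < b) _ (fun a b h => by omega)
      (List.Pairwise.filter _ (PySem.List.pairwise_lt_pyRange_one 2 number))
  refine List.Perm.eq_of_pairwise (fun a b _ _ h1 h2 => by omega) hpL hpR ?_
  rw [List.perm_ext_iff_of_nodup (hpL.imp fun h => Int.ne_of_lt h) (hpR.imp fun h => Int.ne_of_lt h)]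
  intro x
  simp only [List.mem_filter, List.mem_map, PySem.List.mem_pyRange_one, decide_eq_true_eq,
    beq_iff_eq]
  constructor
  · rintro ⟨⟨⟨hx1, hx2⟩, hm⟩, hlt, hle⟩
    refine ⟨x - i, ⟨⟨by omega, by omega⟩, by omega, ?_⟩, by omega⟩
    have : i + (x - i) = x := by omega
    rw [this]; exact hm
  · rintro ⟨j, ⟨⟨hj1, hj2⟩, hij, hm⟩, hx⟩
    have hdvd : (i + j) ∣ number := (PySem.Int.mod_eq_zero_iff_dvd _ _).mp hm
    have hle : i + j ≤ number := Int.le_of_dvd (by omega) hdvd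
    have hx' : x = j + i := hx.symm
    refine ⟨⟨⟨by omega, by omega⟩, ?_⟩, by omega, by omega⟩
    have : x = i + j := by omega
    rw [this]; exact hm

-- the per-i string lists of the two programs agree
theorem inner_lists_eq (number i : Int) (h2 : 2 ≤ number) (hi : 1 ≤ i) :
    (((PySem.List.pyRange 1 (number + 1) 1).filter
        (fun s => PySem.Int.mod number s == 0)).filter
      (fun s => decide (i < s - i ∧ s - i ≤ number - 1))).map
        (fun s => PySem.Int.toStr i ++ PySem.Int.toStr (s - i))
    = ((PySem.List.pyRange 2 number 1).filter
        (fun j => decide (i < j ∧ PySem.Int.mod number (i + j) = 0))).map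
        (fun j => PySem.Int.toStr i ++ PySem.Int.toStr j) := by
  rw [divs_filter_eq number i h2 hi, List.map_map]
  exact List.map_congr_left (fun j _ => by simp)

-- ===== VERDICT (by name: the statement is the Claim_ definition above) =====
theorem get_cipher_spec : Claim_equal_get_cipher := by
  intro number _
  unfold Spec_get_cipher get_cipher get_cipher_alt
  by_cases h2 : number < 2
  · rw [PySem.List.pyRange_one_eq_nil (by omega)]
    simp [h2]
  · rw [if_neg h2]
    have h2' : 2 ≤ number := by omega
    have hB : ∀ (i : Int) (acc : List String),
        (((PySem.List.pyRange 1 (number + 1) 1).filter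
            (fun s => PySem.Int.mod number s == 0)).foldl (fun parts s =>
          let j := s - i
          if i < j ∧ j ≤ number - 1 then parts ++ [PySem.Int.toStr i ++ PySem.Int.toStr j]
          else parts) acc)
        = acc ++ (((PySem.List.pyRange 1 (number + 1) 1).filter
            (fun s => PySem.Int.mod number s == 0)).filter
              (fun s => decide (i < s - i ∧ s - i ≤ number - 1))).map
            (fun s => PySem.Int.toStr i ++ PySem.Int.toStr (s - i)) := by
      intro i acc
      exact PySem.List.foldl_append_ite
        (p := fun s => i < s - i ∧ s - i ≤ number - 1)
        (f := fun s => PySem.Int.toStr i ++ PySem.Int.toStr (s - i)) _ _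
    calc (PySem.List.pyRange 1 number 1).foldl (fun cipher i =>
          (PySem.List.pyRange 2 number 1).foldl (fun cipher j =>
            if j ≤ i then cipher
            else if PySem.Int.mod number (i + j) = 0 then
              cipher ++ PySem.Int.toStr i ++ PySem.Int.toStr j
            else cipher) cipher) ""
        = (PySem.List.pyRange 1 number 1).foldl (fun c i =>
            c ++ PySem.Str.join ""
              (((PySem.List.pyRange 2 number 1).filter
                (fun j => decide (i < j ∧ PySem.Int.mod number (i + j) = 0))).map
                (fun j => PySem.Int.toStr i ++ PySem.Int.toStr j))) "" := by
          exact PySem.List.foldl_congr_mem _ _ _ _ (fun acc i _ => innerA_eq number i _ acc)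
      _ = PySem.Str.join "" ((PySem.List.pyRange 1 number 1).map (fun i =>
            PySem.Str.join ""
              (((PySem.List.pyRange 2 number 1).filter
                (fun j => decide (i < j ∧ PySem.Int.mod number (i + j) = 0))).map
                (fun j => PySem.Int.toStr i ++ PySem.Int.toStr j)))) := by
          rw [outer_str_fold]; rfl
      _ = PySem.Str.join "" ((PySem.List.pyRange 1 number 1).foldl (fun parts i =>
            (((PySem.List.pyRange 1 (number + 1) 1).filter
              (fun s => PySem.Int.mod number s == 0)).foldl (fun parts s =>
                let j := s - i
                if i < j ∧ j ≤ number - 1 then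
                  parts ++ [PySem.Int.toStr i ++ PySem.Int.toStr j]
                else parts) parts)) []) := by
          rw [PySem.List.foldl_congr_mem _ _
            (fun (parts : List String) (i : Int) => parts ++
              (((PySem.List.pyRange 1 (number + 1) 1).filter
                (fun s => PySem.Int.mod number s == 0)).filter
                  (fun s => decide (i < s - i ∧ s - i ≤ number - 1))).map
                (fun s => PySem.Int.toStr i ++ PySem.Int.toStr (s - i))) _
            (fun acc i _ => hB i acc)]
          rw [PySem.List.foldl_append_eq_flatMap, List.nil_append, join_map_join]
          congr 1
          refine List.flatMap_congr (fun i hi => ?_)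
          have hi1 : 1 ≤ i := ((PySem.List.mem_pyRange_one).mp hi).1
          exact (inner_lists_eq number i h2' hi1).symm
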